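-- pv_equiv track=rewrite | github.com/KasselFelix/Python-Programming_element | TME8/TME8.py | encadrements4
-- ===== SOURCE A (Python) =====
-- def encadrements4(n):
--     """
--     int -> List[tuple(int,int,int)]
--     Hypothèse : n est un entier.
--     """
--
--     #L:List[tuple(int,int,int)]
--     L=[]
--
--     #cpt:int
--     cpt=0
--     for i in range(1,n+1):
--         for j in range(i,n+1):
--             for k in range(j,n+1):
--                     cpt=cpt+1
--                     L.append((i,j,k))
--
--     return L
-- ===== SOURCE B (Python) =====
-- def encadrements4(n):
--     """
--     int -> List[tuple(int,int,int)]
--     Hypothese : n est un entier.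
--     """
--     # Odometer / successor iteration: a single loop over the state (i, j, k)
--     # that repeatedly computes the lexicographic successor among the
--     # non-decreasing triples of 1..n, instead of three nested loops.
--     L = []
--     if n >= 1:
--         i = j = k = 1
--         while True:
--             L.append((i, j, k))
--             if k < n:
--                 k += 1
--             elif j < n:
--                 j += 1
--                 k = j
--             elif i < n:
--                 i += 1
--                 j = k = i
--             else:
--                 break
--     return L
-- ===== Notes on version B (the rewrite author's own statement) =====
-- stated objective: alternative
-- what changed: Replaces the three nested for-loops (and the dead cpt counter) by a single odometer-style loop over one state triple (i,j,k) that repeatedly computes the lexicographic successor of the current non-decreasing triple.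
import Mathlib
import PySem

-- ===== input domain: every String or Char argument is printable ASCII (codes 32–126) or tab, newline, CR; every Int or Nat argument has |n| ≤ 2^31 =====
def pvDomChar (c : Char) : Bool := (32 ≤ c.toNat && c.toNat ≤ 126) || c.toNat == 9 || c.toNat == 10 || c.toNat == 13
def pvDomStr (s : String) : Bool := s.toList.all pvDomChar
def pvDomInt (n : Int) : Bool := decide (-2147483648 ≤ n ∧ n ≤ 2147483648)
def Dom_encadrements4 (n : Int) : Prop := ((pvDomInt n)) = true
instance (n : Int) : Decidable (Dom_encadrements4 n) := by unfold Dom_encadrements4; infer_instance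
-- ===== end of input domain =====

-- B replaces A's three nested loops (and the dead cpt counter) by a single
-- odometer-style loop that steps one state triple (i,j,k) to its lexicographic
-- successor among the non-decreasing triples of 1..n; alternative, same values.

-- ===== PORT A =====
-- A: L=[]; cpt=0; triple nested for over range(1,n+1)/range(i,n+1)/range(j,n+1),
-- appending (i,j,k) and incrementing cpt; returns L. State is the pair (L, cpt).
def encadrements4 (n : Int) : List (Int × Int × Int) :=
  let s :=
    (PySem.List.pyRange 1 (n+1) 1).foldl (fun s i =>
      (PySem.List.pyRange i (n+1) 1).foldl (fun s j =>
        (PySem.List.pyRange j (n+1) 1).foldl (fun s k =>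
          (s.1 ++ [(i, j, k)], s.2 + 1)) s) s)
      (([] : List (Int × Int × Int)), (0 : Int))
  s.1

-- ===== PORT B =====
-- B's while-loop: emit (i,j,k), then advance the state to its successor
-- (k+1 / carry to j+1,j+1 / carry to i+1,i+1,i+1), or stop when (n,n,n).
def pvStep (n i j k : Int) : List (Int × Int × Int) :=
  (i, j, k) ::
    (if h1 : k < n then pvStep n i j (k + 1)
     else if h2 : j < n then pvStep n i (j + 1) (j + 1)
     else if h3 : i < n then pvStep n (i + 1) (i + 1) (i + 1)
     else [])
termination_by ((n - i).toNat, (n - j).toNat, (n - k).toNat)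
decreasing_by
  · right; right; omega
  · right; left; omega
  · left; omega

def encadrements4_alt (n : Int) : List (Int × Int × Int) :=
  if 1 ≤ n then pvStep n 1 1 1 else []

-- ===== PRECONDITION & SPEC =====
def Spec_encadrements4 (n : Int) (out : List (Int × Int × Int)) : Prop := out = encadrements4_alt n
instance (n : Int) (out : List (Int × Int × Int)) : Decidable (Spec_encadrements4 n out) := by unfold Spec_encadrements4; infer_instance

-- ===== CLAIM (what is proved, stated in full; the proofs are below) =====
def Claim_equal_encadrements4 : Prop := ∀ (n : Int), Dom_encadrements4 n → Spec_encadrements4 n (encadrements4 n)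

-- ===== LEMMAS AND PROOFS =====

-- A's loops, with the pair state (L, cpt): first components only
theorem pvFold1_fst (i j : Int) (l : List Int) :
    ∀ (acc : List (Int × Int × Int) × Int),
      (l.foldl (fun s k => (s.1 ++ [(i, j, k)], s.2 + 1)) acc).1 =
        acc.1 ++ l.map (fun k => (i, j, k)) := by
  induction l with
  | nil => simp
  | cons x ys ih => intro acc; rw [List.foldl_cons, ih]; simp

theorem pvFold2_fst (n i : Int) (l : List Int) :
    ∀ (acc : List (Int × Int × Int) × Int),
      (l.foldl (fun s j =>
          (PySem.List.pyRange j (n+1) 1).foldl (fun s k =>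
            (s.1 ++ [(i, j, k)], s.2 + 1)) s) acc).1 =
        acc.1 ++ l.flatMap (fun j =>
          (PySem.List.pyRange j (n+1) 1).map (fun k => (i, j, k))) := by
  induction l with
  | nil => simp
  | cons x ys ih => intro acc; rw [List.foldl_cons, ih, pvFold1_fst]; simp

theorem pvFold3_fst (n : Int) (l : List Int) :
    ∀ (acc : List (Int × Int × Int) × Int),
      (l.foldl (fun s i =>
          (PySem.List.pyRange i (n+1) 1).foldl (fun s j =>
            (PySem.List.pyRange j (n+1) 1).foldl (fun s k =>
              (s.1 ++ [(i, j, k)], s.2 + 1)) s) s) acc).1 =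
        acc.1 ++ l.flatMap (fun i =>
          (PySem.List.pyRange i (n+1) 1).flatMap (fun j =>
            (PySem.List.pyRange j (n+1) 1).map (fun k => (i, j, k)))) := by
  induction l with
  | nil => simp
  | cons x ys ih => intro acc; rw [List.foldl_cons, ih, pvFold2_fst]; simp

theorem encadrements4_flat (n : Int) :
    encadrements4 n =
      (PySem.List.pyRange 1 (n+1) 1).flatMap (fun i =>
        (PySem.List.pyRange i (n+1) 1).flatMap (fun j =>
          (PySem.List.pyRange j (n+1) 1).map (fun k => (i, j, k)))) := by
  unfold encadrements4
  rw [pvFold3_fst]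
  simp

-- B's loop from state (i,j,k) produces exactly the tail of the flat enumeration
theorem pvStep_eq (n : Int) : ∀ i j k : Int, i ≤ n → j ≤ n → k ≤ n →
    pvStep n i j k =
      (PySem.List.pyRange k (n+1) 1).map (fun k' => (i, j, k')) ++
      ((PySem.List.pyRange (j+1) (n+1) 1).flatMap (fun j' =>
        (PySem.List.pyRange j' (n+1) 1).map (fun k' => (i, j', k'))) ++
      (PySem.List.pyRange (i+1) (n+1) 1).flatMap (fun i' =>
        (PySem.List.pyRange i' (n+1) 1).flatMap (fun j' =>
          (PySem.List.pyRange j' (n+1) 1).map (fun k' => (i', j', k'))))) := by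
  refine pvStep.induct n (motive := fun i j k =>
    i ≤ n → j ≤ n → k ≤ n →
    pvStep n i j k =
      (PySem.List.pyRange k (n+1) 1).map (fun k' => (i, j, k')) ++
      ((PySem.List.pyRange (j+1) (n+1) 1).flatMap (fun j' =>
        (PySem.List.pyRange j' (n+1) 1).map (fun k' => (i, j', k'))) ++
      (PySem.List.pyRange (i+1) (n+1) 1).flatMap (fun i' =>
        (PySem.List.pyRange i' (n+1) 1).flatMap (fun j' =>
          (PySem.List.pyRange j' (n+1) 1).map (fun k' => (i', j', k')))))) ?_
  intro i j k ih1 ih2 ih3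
  · intro hi hj hk
    by_cases h1 : k < n
    · rw [pvStep, dif_pos h1, ih1 h1 hi hj (by omega),
          PySem.List.pyRange_one_cons (show k < n + 1 by omega)]
      simp
    · by_cases h2 : j < n
      · rw [pvStep, dif_neg h1, dif_pos h2, ih2 h2 hi (by omega) (by omega),
            PySem.List.pyRange_one_cons (show k < n + 1 by omega),
            PySem.List.pyRange_one_eq_nil (show n + 1 ≤ k + 1 by omega),
            PySem.List.pyRange_one_cons (show j + 1 < n + 1 by omega)]
        simp [List.flatMap_cons, PySem.List.pyRange_one_cons (show j + 1 < n + 1 by omega)]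
      · by_cases h3 : i < n
        · rw [pvStep, dif_neg h1, dif_neg h2, dif_pos h3,
              ih3 h3 (by omega) (by omega) (by omega),
              PySem.List.pyRange_one_cons (show k < n + 1 by omega),
              PySem.List.pyRange_one_eq_nil (show n + 1 ≤ k + 1 by omega),
              PySem.List.pyRange_one_eq_nil (show n + 1 ≤ j + 1 by omega),
              PySem.List.pyRange_one_cons (show i + 1 < n + 1 by omega)]
          simp [List.flatMap_cons, PySem.List.pyRange_one_cons (show i + 1 < n + 1 by omega)]
        · rw [pvStep, dif_neg h1, dif_neg h2, dif_neg h3,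
              PySem.List.pyRange_one_cons (show k < n + 1 by omega),
              PySem.List.pyRange_one_eq_nil (show n + 1 ≤ k + 1 by omega),
              PySem.List.pyRange_one_eq_nil (show n + 1 ≤ j + 1 by omega),
              PySem.List.pyRange_one_eq_nil (show n + 1 ≤ i + 1 by omega)]
          simp

-- ===== VERDICT (by name: the statement is the Claim_ definition above) =====
theorem encadrements4_spec : Claim_equal_encadrements4 := by
  intro n _
  unfold Spec_encadrements4 encadrements4_alt
  rw [encadrements4_flat]
  by_cases hn : 1 ≤ n
  · rw [if_pos hn, pvStep_eq n 1 1 1 hn hn hn,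
        PySem.List.pyRange_one_cons (show (1:Int) < n + 1 by omega)]
    simp [List.flatMap_cons,
          PySem.List.pyRange_one_cons (show (1:Int) < n + 1 by omega)]
  · rw [if_neg hn, PySem.List.pyRange_one_eq_nil (show n + 1 ≤ 1 by omega)]
    simp
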